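-- pv_equiv track=rewrite | github.com/jcm0314/Algorithm | 프로그래머스/0/120852. 소인수분해/소인수분해.py | solution
-- ===== SOURCE A (Python) =====
-- def solution(n):
--     answer = []
--     for i in range(2, n + 1):
--         while n % i == 0:
--             answer.append(i)
--             n = n // i
--
--     answer = list(set(answer))  # 중복된 소인수 제거
--     answer.sort()  # 오름차순으로 정렬
--
--     return answer
-- ===== SOURCE B (Python) =====
-- def solution(n):
--     res = []
--     i = 2
--     m = n
--     while i * i <= m:
--         if m % i == 0:
--             res.append(i)
--             while m % i == 0:
--                 m //= i
--         i += 1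
--     if m > 1:
--         res.append(m)
--     return res
-- ===== Notes on version B (the rewrite author's own statement) =====
-- stated objective: faster
-- what changed: Replaces the O(n) scan of all candidates 2..n followed by set-dedup and sort with trial division up to sqrt(n) (plus the remaining prime cofactor), which emits the distinct prime factors already sorted, so no dedup or sort is needed.
import Mathlib
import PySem

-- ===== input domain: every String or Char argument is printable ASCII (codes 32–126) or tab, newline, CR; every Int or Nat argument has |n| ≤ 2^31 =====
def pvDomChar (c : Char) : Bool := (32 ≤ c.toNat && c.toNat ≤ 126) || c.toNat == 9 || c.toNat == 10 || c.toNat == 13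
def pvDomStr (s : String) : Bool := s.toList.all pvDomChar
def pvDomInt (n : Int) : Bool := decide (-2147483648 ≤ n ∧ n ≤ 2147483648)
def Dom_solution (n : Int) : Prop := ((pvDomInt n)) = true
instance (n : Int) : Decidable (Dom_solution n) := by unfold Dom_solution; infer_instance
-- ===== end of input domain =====

-- B replaces A's O(n) scan of every candidate 2..n plus set-dedup and sort by trial
-- division up to sqrt(n) (with the remaining cofactor appended), emitting the distinct
-- prime factors already in ascending order.

-- ===== PORT A =====
-- inner 'while n % i == 0: answer.append(i); n = n // i' (fuel only makes it total;
-- it is always sufficient on reachable states, where 1 ≤ m)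
def divOutA : Nat → Int → Int → List Int × Int
  | 0, _, m => ([], m)
  | fuel+1, i, m =>
      if PySem.Int.mod m i = 0 then
        let r := divOutA fuel i (PySem.Int.floordiv m i)
        (i :: r.1, r.2)
      else ([], m)

-- one iteration of A's for-loop: state = (current n, answer)
def stepA (st : Int × List Int) (i : Int) : Int × List Int :=
  let r := divOutA (st.1.toNat + 1) i st.1
  (r.2, st.2 ++ r.1)

def solution (n : Int) : List Int :=
  let st := (PySem.List.pyRange 2 (n + 1) 1).foldl stepA (n, [])
  PySem.List.sorted (PySem.Set.ofList st.2) (fun x => x) false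

-- ===== PORT B =====
-- inner 'while m % i == 0: m //= i' (fuel-totalised, always sufficient when 1 ≤ m)
def stripAll : Nat → Int → Int → Int
  | 0, _, m => m
  | fuel+1, i, m =>
      if PySem.Int.mod m i = 0 then stripAll fuel i (PySem.Int.floordiv m i) else m

-- 'while i * i <= m: …' (fuel-totalised)
def trialLoop : Nat → Int → Int → List Int
  | 0, _, _ => []
  | fuel+1, i, m =>
      if i * i ≤ m then
        if PySem.Int.mod m i = 0 then
          i :: trialLoop fuel (i + 1) (stripAll (m.toNat + 1) i m)
        else trialLoop fuel (i + 1) m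
      else if 1 < m then [m] else []

def solution_alt (n : Int) : List Int := trialLoop (n.toNat + 1) 2 n

-- ===== PRECONDITION & SPEC =====
def Spec_solution (n : Int) (out : List Int) : Prop := out = solution_alt n
instance (n : Int) (out : List Int) : Decidable (Spec_solution n out) := by unfold Spec_solution; infer_instance

-- ===== CLAIM (what is proved, stated in full; the proofs are below) =====
def Claim_equal_solution : Prop := ∀ (n : Int), Dom_solution n → Spec_solution n (solution n)

-- ===== LEMMAS AND PROOFS =====

-- 'p is a prime factor of n'
def pvPF (n p : Int) : Prop := 0 < p ∧ Prime p ∧ p ∣ n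

-- loop invariant shared by both programs: before handling candidate i the residue m is
-- positive, divides n0, has no divisor in [2, i), and retains every prime factor ≥ i of n0
def pvInv (n0 i m : Int) : Prop :=
  1 ≤ m ∧ m ∣ n0 ∧ (∀ d, 2 ≤ d → d < i → ¬ d ∣ m) ∧ (∀ p, pvPF n0 p → i ≤ p → p ∣ m)

lemma pvPF_two_le {n p : Int} (h : pvPF n p) : 2 ≤ p := by
  obtain ⟨hp, hpr, _⟩ := h
  have := hpr.ne_one
  omega

lemma prime_of_no_small_dvd {i : Int} (h2 : 2 ≤ i)
    (h : ∀ d, 2 ≤ d → d < i → ¬ d ∣ i) : Prime i := by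
  rw [Int.prime_iff_natAbs_prime]
  by_contra hnp
  obtain ⟨d, hdvd, hd2, hdlt⟩ := Nat.exists_dvd_of_not_prime2 (by omega) hnp
  have hiabs : (i.natAbs : Int) = i := Int.natAbs_of_nonneg (by omega)
  have hdivd : (d : Int) ∣ i := by
    rw [← hiabs]; exact_mod_cast hdvd
  exact h d (by exact_mod_cast hd2) (by omega) hdivd

-- candidate i divides the residue iff i is a prime factor of n0 (under the invariant)
lemma dvd_residue_iff {n0 i m : Int} (h2 : 2 ≤ i) (hinv : pvInv n0 i m) :
    i ∣ m ↔ pvPF n0 i := by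
  obtain ⟨hm1, hmn, hsmall, hbig⟩ := hinv
  constructor
  · intro hdvd
    refine ⟨by omega, prime_of_no_small_dvd h2 ?_, hdvd.trans hmn⟩
    intro d hd2 hdi hddvd
    exact hsmall d hd2 (by omega) (hddvd.trans hdvd)
  · intro hpf
    exact hbig i hpf le_rfl

-- stripping candidate i fully preserves the invariant at i+1
lemma pvInv_step {n0 i m m' : Int} (h2 : 2 ≤ i) (hinv : pvInv n0 i m)
    (k : Nat) (hfac : m = i ^ k * m') (hm'1 : 1 ≤ m') (hnd : ¬ i ∣ m') :
    pvInv n0 (i + 1) m' := by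
  obtain ⟨hm1, hmn, hsmall, hbig⟩ := hinv
  have hdm : m' ∣ m := ⟨i ^ k, by rw [hfac]; ring⟩
  refine ⟨hm'1, hdm.trans hmn, ?_, ?_⟩
  · intro d hd2 hdlt hddvd
    rcases lt_or_ge d i with hlt | hge
    · exact hsmall d hd2 hlt (hddvd.trans hdm)
    · have : d = i := by omega
      exact hnd (this ▸ hddvd)
  · intro p hpf hip
    have hp2 := pvPF_two_le hpf
    have hpm : p ∣ m := hbig p hpf (by omega)
    rw [hfac] at hpm
    rcases hpf.2.1.dvd_mul.mp hpm with hpow | hgood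
    · have hpi : p ∣ i := hpf.2.1.dvd_of_dvd_pow hpow
      have := Int.le_of_dvd (by omega) hpi
      omega
    · exact hgood

-- the inner while-loop of A: characterisation with sufficient fuel
lemma divOutA_spec : ∀ (fuel : Nat) (i m : Int), 2 ≤ i → 1 ≤ m → m.toNat ≤ fuel →
    ∃ (k : Nat) (m' : Int), divOutA (fuel + 1) i m = (List.replicate k i, m') ∧
      m = i ^ k * m' ∧ 1 ≤ m' ∧ ¬ i ∣ m' := by
  intro fuel
  induction fuel with
  | zero => intro i m h2 hm hf; omega
  | succ f ih =>
    intro i m h2 hm hf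
    by_cases hdvd : i ∣ m
    · obtain ⟨c, hc⟩ := hdvd
      have hc1 : 1 ≤ c := by nlinarith
      have hclt : c < m := by nlinarith
      have hfd : PySem.Int.floordiv m i = c := by
        rw [PySem.Int.floordiv_eq_ediv_of_pos (by omega), hc, Int.mul_ediv_cancel_left _ (by omega)]
      obtain ⟨k, m', heq, hfac, hm'1, hnd⟩ := ih i c h2 hc1 (by omega)
      have hmod : PySem.Int.mod m i = 0 := (PySem.Int.mod_eq_zero_iff_dvd m i).mpr ⟨c, hc⟩
      refine ⟨k + 1, m', ?_, ?_, hm'1, hnd⟩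
      · rw [divOutA, if_pos hmod, hfd, heq]
        simp [List.replicate_succ]
      · rw [hc, hfac]; ring
    · refine ⟨0, m, ?_, by simp, hm, hdvd⟩
      simp [divOutA, PySem.Int.mod_eq_zero_iff_dvd, hdvd]

-- B's inner strip loop computes the same residue as A's inner loop
lemma stripAll_spec (fuel : Nat) (i m : Int) :
    stripAll fuel i m = (divOutA fuel i m).2 := by
  induction fuel generalizing m with
  | zero => simp [stripAll, divOutA]
  | succ f ih =>
    simp only [stripAll, divOutA]
    split_ifs with h
    · simpa using ih _
    · rfl

-- A's for-loop over a block of consecutive candidates: the answer collects exactly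
-- the prime factors of n0 below the end of the block
lemma loopA_spec (n0 : Int) : ∀ (c : Nat) (i m : Int) (ans : List Int), 2 ≤ i →
    pvInv n0 i m → (∀ x, x ∈ ans ↔ pvPF n0 x ∧ x < i) →
    (∀ x, x ∈ ((PySem.List.pyRange i (i + c) 1).foldl stepA (m, ans)).2 ↔
      pvPF n0 x ∧ x < i + c) := by
  intro c
  induction c with
  | zero =>
    intro i m ans h2 hinv hans
    simpa [PySem.List.pyRange_one] using hans
  | succ c ih =>
    intro i m ans h2 hinv hans x
    have hcons : PySem.List.pyRange i (i + (c + 1 : Nat)) 1 =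
        i :: PySem.List.pyRange (i + 1) (i + (c + 1 : Nat)) 1 :=
      PySem.List.pyRange_one_cons (by omega)
    have hm1 : 1 ≤ m := hinv.1
    obtain ⟨k, m', heq, hfac, hm'1, hnd⟩ :=
      divOutA_spec m.toNat i m h2 hm1 le_rfl
    have hstep : stepA (m, ans) i = (m', ans ++ List.replicate k i) := by
      simp [stepA, heq]
    have hinv' : pvInv n0 (i + 1) m' := pvInv_step h2 hinv k hfac hm'1 hnd
    have hans' : ∀ x, x ∈ ans ++ List.replicate k i ↔ pvPF n0 x ∧ x < i + 1 := by
      intro x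
      simp only [List.mem_append, hans x, List.mem_replicate]
      constructor
      · rintro (⟨hpf, hlt⟩ | ⟨hk, hx⟩)
        · exact ⟨hpf, by omega⟩
        · rw [hx]
          have hdvd : i ∣ m := by
            rcases Nat.eq_zero_or_pos k with h0 | h0
            · omega
            · rw [hfac]
              exact Dvd.dvd.mul_right (dvd_pow_self i (by omega)) m'
          exact ⟨(dvd_residue_iff h2 hinv).mp hdvd, by omega⟩
      · rintro ⟨hpf, hlt⟩
        rcases lt_or_ge x i with hxi | hxi
        · exact Or.inl ⟨hpf, hxi⟩
        · have hxeq : x = i := by omega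
          have hdvd : i ∣ m := (dvd_residue_iff h2 hinv).mpr (hxeq ▸ hpf)
          have hk0 : k ≠ 0 := by
            intro h0
            rw [h0] at hfac
            simp at hfac
            exact hnd (hfac ▸ hdvd)
          exact Or.inr ⟨hk0, hxeq⟩
    have hrange : i + (c + 1 : Nat) = (i + 1) + (c : Nat) := by push_cast; ring
    calc x ∈ ((PySem.List.pyRange i (i + (c+1:Nat)) 1).foldl stepA (m, ans)).2
        ↔ x ∈ ((PySem.List.pyRange (i+1) ((i+1) + (c:Nat)) 1).foldl stepA
            (m', ans ++ List.replicate k i)).2 := by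
          rw [hcons, hrange]; simp [hstep]
      _ ↔ pvPF n0 x ∧ x < i + (c + 1 : Nat) := by
          rw [ih (i+1) m' _ (by omega) hinv' hans' x, hrange]

-- when no divisor of m is below i and i*i > m > 1, m itself is prime
lemma prime_of_sqrt {i m : Int} (h2 : 2 ≤ i) (hm : 1 < m) (hgt : m < i * i)
    (hsmall : ∀ d, 2 ≤ d → d < i → ¬ d ∣ m) : Prime m := by
  apply prime_of_no_small_dvd (by omega)
  intro d hd2 hdlt hddvd
  obtain ⟨c, hc⟩ := hddvd
  have hc1 : 1 ≤ c := by nlinarith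
  have hc2 : 2 ≤ c := by
    rcases eq_or_lt_of_le hc1 with h | h
    · exfalso; rw [← h] at hc; omega
    · omega
  have hcdvd : c ∣ m := Dvd.intro_left _ hc.symm
  have hdi : i ≤ d := by
    by_contra h
    exact hsmall d hd2 (by omega) ⟨c, hc⟩
  have hci : i ≤ c := by
    by_contra h
    exact hsmall c hc2 (by omega) hcdvd
  nlinarith

-- B's trial-division loop returns exactly the prime factors ≥ i of n0, strictly ascending
lemma trialLoop_spec (n0 : Int) : ∀ (fuel : Nat) (i m : Int), 2 ≤ i → pvInv n0 i m →
    (m + 1 - i).toNat < fuel →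
    (trialLoop fuel i m).Pairwise (· < ·) ∧
    (∀ x, x ∈ trialLoop fuel i m ↔ pvPF n0 x ∧ i ≤ x) := by
  intro fuel
  induction fuel with
  | zero => intro i m h2 hinv hf; omega
  | succ f ih =>
    intro i m h2 hinv hf
    obtain ⟨hm1, hmn, hsmall, hbig⟩ := hinv
    simp only [trialLoop]
    split_ifs with hsq hdvd hm2
    · -- i * i ≤ m, i ∣ m : strip i fully, recurse
      rw [PySem.Int.mod_eq_zero_iff_dvd] at hdvd
      obtain ⟨k, m', heq, hfac, hm'1, hnd⟩ :=
        divOutA_spec m.toNat i m h2 (by omega) le_rfl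
      have hstrip : stripAll (m.toNat + 1) i m = m' := by
        rw [stripAll_spec, heq]
      have hinv' : pvInv n0 (i + 1) m' :=
        pvInv_step h2 ⟨by omega, hmn, hsmall, hbig⟩ k hfac hm'1 hnd
      have hm'le : m' ≤ m := Int.le_of_dvd (by omega) ⟨i ^ k, by rw [hfac]; ring⟩
      have him : i ≤ m := by nlinarith
      obtain ⟨hpw, hmem⟩ := ih (i + 1) m' (by omega) hinv' (by omega)
      rw [hstrip]
      constructor
      · refine List.pairwise_cons.mpr ⟨?_, hpw⟩
        intro x hx
        have := (hmem x).mp hx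
        omega
      · intro x
        simp only [List.mem_cons, hmem x]
        constructor
        · rintro (rfl | ⟨hpf, hge⟩)
          · exact ⟨(dvd_residue_iff h2 ⟨by omega, hmn, hsmall, hbig⟩).mp hdvd, le_rfl⟩
          · exact ⟨hpf, by omega⟩
        · rintro ⟨hpf, hge⟩
          rcases eq_or_lt_of_le hge with rfl | hgt
          · exact Or.inl rfl
          · exact Or.inr ⟨hpf, by omega⟩
    · -- i * i ≤ m, i ∤ m
      rw [PySem.Int.mod_eq_zero_iff_dvd] at hdvd
      have hinv' : pvInv n0 (i + 1) m := by
        refine ⟨by omega, hmn, ?_, ?_⟩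
        · intro d hd2 hdlt hddvd
          rcases lt_or_ge d i with h | h
          · exact hsmall d hd2 h hddvd
          · have : d = i := by omega
            exact hdvd (this ▸ hddvd)
        · intro p hpf hip
          exact hbig p hpf (by omega)
      have him : i ≤ m := by nlinarith
      obtain ⟨hpw, hmem⟩ := ih (i + 1) m (by omega) hinv' (by omega)
      refine ⟨hpw, fun x => ?_⟩
      rw [hmem x]
      constructor
      · rintro ⟨hpf, hge⟩; exact ⟨hpf, by omega⟩
      · rintro ⟨hpf, hge⟩
        refine ⟨hpf, ?_⟩
        rcases eq_or_lt_of_le hge with rfl | h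
        · exact absurd ((dvd_residue_iff h2 ⟨by omega, hmn, hsmall, hbig⟩).mpr hpf) hdvd
        · omega
    · -- i * i > m, m > 1 : the residue is the last prime factor
      have hmpr : Prime m := prime_of_sqrt h2 (by omega) (by omega) hsmall
      have hi_le_m : i ≤ m := by
        by_contra h
        exact hsmall m (by omega) (by omega) dvd_rfl
      refine ⟨List.pairwise_singleton _ _, fun x => ?_⟩
      simp only [List.mem_singleton]
      constructor
      · rintro rfl
        exact ⟨⟨by omega, hmpr, hmn⟩, hi_le_m⟩
      · rintro ⟨hpf, hge⟩
        have hxm : x ∣ m := hbig x hpf hge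
        have hx2 := pvPF_two_le hpf
        have h1 : x.natAbs ∣ m.natAbs := Int.natAbs_dvd_natAbs.mpr hxm
        have h2' : x.natAbs = m.natAbs :=
          (Nat.prime_dvd_prime_iff_eq
            (Int.prime_iff_natAbs_prime.mp hpf.2.1)
            (Int.prime_iff_natAbs_prime.mp hmpr)).mp h1
        omega
    · -- i * i > m, m ≤ 1 : no prime factor ≥ i remains
      refine ⟨List.Pairwise.nil, fun x => ?_⟩
      simp only [List.not_mem_nil, false_iff]
      rintro ⟨hpf, hge⟩
      have hxm : x ∣ m := hbig x hpf hge
      have hx2 := pvPF_two_le hpf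
      have := Int.le_of_dvd (by omega) hxm
      omega

-- ===== VERDICT (by name: the statement is the Claim_ definition above) =====
theorem solution_spec : Claim_equal_solution := by
  intro n _
  unfold Spec_solution solution solution_alt
  rcases lt_or_ge n 2 with hn | hn
  · -- n < 2: both sides are []
    have hrange : PySem.List.pyRange 2 (n + 1) 1 = [] := by
      rw [PySem.List.pyRange_one]
      have : (n + 1 - 2).toNat = 0 := by omega
      simp [this]
    have hB : trialLoop (n.toNat + 1) 2 n = [] := by
      have h4 : ¬ ((4 : Int) ≤ n) := by omega
      have h1 : ¬ (1 < n) := by omega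
      simp [trialLoop, h4, h1]
    rw [hrange, hB]
    rfl
  · -- n ≥ 2: both compute the ascending list of distinct prime factors of n
    have hinv : pvInv n 2 n := by
      refine ⟨by omega, dvd_rfl, by omega, fun p hpf _ => hpf.2.2⟩
    -- A's collected answer has exactly the prime factors of n as elements
    have hc : (2 : Int) + ((n - 1).toNat : Int) = n + 1 := by omega
    have hmemA : ∀ x, x ∈ ((PySem.List.pyRange 2 (n + 1) 1).foldl stepA (n, [])).2 ↔
        pvPF n x := by
      intro x
      have := loopA_spec n (n - 1).toNat 2 n [] (by omega) hinv (by
        intro y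
        simp only [List.not_mem_nil, false_iff]
        rintro ⟨hpf, hlt⟩
        have := pvPF_two_le hpf
        omega) x
      rw [hc] at this
      rw [this]
      constructor
      · rintro ⟨hpf, _⟩; exact hpf
      · intro hpf
        have hle := Int.le_of_dvd (by omega) hpf.2.2
        exact ⟨hpf, by omega⟩
    -- B's list is strictly ascending with the same elements
    obtain ⟨hpw, hmemB⟩ := trialLoop_spec n (n.toNat + 1) 2 n (by omega) hinv (by omega)
    have hmemB' : ∀ x, x ∈ trialLoop (n.toNat + 1) 2 n ↔ pvPF n x := by
      intro x
      rw [hmemB x]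
      exact ⟨fun h => h.1, fun h => ⟨h, pvPF_two_le h⟩⟩
    -- a strictly ascending list with the same elements is the sorted dedup
    set ans := ((PySem.List.pyRange 2 (n + 1) 1).foldl stepA (n, [])).2
    set L := trialLoop (n.toNat + 1) 2 n
    have hnodupL : L.Nodup := hpw.imp ne_of_lt
    have hperm : L.Perm (PySem.Set.ofList ans) := by
      rw [List.perm_ext_iff_of_nodup hnodupL (PySem.Set.nodup_ofList ans)]
      intro x
      rw [PySem.Set.mem_ofList, hmemA x, hmemB' x]
    exact PySem.List.sorted_eq_of_perm_of_pairwise_lt _ _ _ hperm hpw
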